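-- pv_equiv track=rewrite | github.com/shamiulalamupom/rokfarmbot | algorithm.py | heliocentric_orbit
-- ===== SOURCE A (Python) =====
-- def heliocentric_orbit(start_x, start_y, total_rounds):
--     """
--     Generate a graph-like orbit path where the orbit expands symmetrically (x and y go one extra step per round).
--
--     Args:
--         start_x (int): Initial X-coordinate of the center.
--         start_y (int): Initial Y-coordinate of the center.
--         total_rounds (int): Number of orbits to generate.
--
--     Returns:
--         list: List of (x, y) coordinates in the orbit pattern.
--     """
--     x, y = start_x, start_y
--     path = [(x, y)]  # Initialize the path with the start point
--     orbit_radius = 1  # Initial orbit radius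
--
--     for round in range(total_rounds):
--         # Directions with steps: [(dx, dy, steps)]
--         directions = [
--             (0, 1, orbit_radius),                                                  # Up
--             (1, 0, orbit_radius + round),       # Right
--             (0, -1, orbit_radius * 2),                                             # Down
--             (-1, 0, orbit_radius * 2),                                             # Left
--             (0, 1, orbit_radius),                                                  # Up
--         ]
--
--         for dx, dy, steps in directions:
--             for _ in range(steps):
--                 x += dx
--                 y += dy
--                 path.append((x, y))
--
--         # Increase orbit radius after completing a full round
--         orbit_radius += 1
--
--     return path
-- ===== SOURCE B (Python) =====
-- def heliocentric_orbit(start_x, start_y, total_rounds):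
--     # Closed-form geometry: round r starts at (start_x - r, start_y) (each round
--     # drifts one step left, net vertical drift zero), so every segment's points
--     # are computed directly by coordinate arithmetic -- no running position state.
--     def round_points(r):
--         cx, cy = start_x - r, start_y
--         up1 = [(cx, cy + t) for t in range(1, r + 2)]
--         right = [(cx + t, cy + r + 1) for t in range(1, 2 * r + 2)]
--         down = [(cx + 2 * r + 1, cy + r + 1 - t) for t in range(1, 2 * r + 3)]
--         left = [(cx + 2 * r + 1 - t, cy - r - 1) for t in range(1, 2 * r + 3)]
--         up2 = [(cx - 1, cy - r - 1 + t) for t in range(1, r + 2)]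
--         return up1 + right + down + left + up2
--     return [(start_x, start_y)] + [p for r in range(total_rounds) for p in round_points(r)]
-- ===== Notes on version B (the rewrite author's own statement) =====
-- stated objective: alternative
-- what changed: A walks the spiral step by step with mutable (x,y) and orbit_radius state; B uses the closed-form geometry (round r starts at (start_x - r, start_y)) and emits each segment's points directly by coordinate arithmetic, with no running position at all.
import Mathlib
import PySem

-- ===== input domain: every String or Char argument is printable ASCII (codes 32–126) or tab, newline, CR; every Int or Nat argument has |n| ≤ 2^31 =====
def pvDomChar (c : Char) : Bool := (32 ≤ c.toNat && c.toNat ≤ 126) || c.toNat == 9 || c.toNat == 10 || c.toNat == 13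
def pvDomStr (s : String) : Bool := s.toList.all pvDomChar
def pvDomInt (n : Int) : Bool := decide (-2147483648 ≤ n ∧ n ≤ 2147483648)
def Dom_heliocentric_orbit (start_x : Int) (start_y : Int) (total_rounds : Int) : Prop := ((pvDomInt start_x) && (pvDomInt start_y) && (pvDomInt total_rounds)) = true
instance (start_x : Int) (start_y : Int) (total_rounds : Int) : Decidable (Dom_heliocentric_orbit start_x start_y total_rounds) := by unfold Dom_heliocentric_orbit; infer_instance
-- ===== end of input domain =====

-- B replaces A's stepwise walk (mutable position and radius) by closed-form geometry:
-- round r starts at (start_x - r, start_y), so every point is computed directly ('alternative').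

-- ===== PORT A =====
-- state: ((x, y), path, orbit_radius)
def heliocentric_orbit (start_x : Int) (start_y : Int) (total_rounds : Int) : List (Int × Int) :=
  let fin := (PySem.List.pyRange 0 total_rounds 1).foldl
    (fun (st : (Int × Int) × List (Int × Int) × Int) (round : Int) =>
      let directions : List (Int × Int × Int) :=
        [(0, 1, st.2.2), (1, 0, st.2.2 + round), (0, -1, st.2.2 * 2),
         (-1, 0, st.2.2 * 2), (0, 1, st.2.2)]
      let st2 := directions.foldl
        (fun (s : (Int × Int) × List (Int × Int)) (d : Int × Int × Int) =>
          (PySem.List.pyRange 0 d.2.2 1).foldl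
            (fun (s : (Int × Int) × List (Int × Int)) (_ : Int) =>
              ((s.1.1 + d.1, s.1.2 + d.2.1), s.2 ++ [(s.1.1 + d.1, s.1.2 + d.2.1)]))
            s)
        (st.1, st.2.1)
      (st2.1, st2.2, st.2.2 + 1))
    ((start_x, start_y), [(start_x, start_y)], 1)
  fin.2.1

-- ===== PORT B =====
-- round_points(r) of Source B: the five segments of round r, by direct coordinate arithmetic
def pvRoundPoints (start_x : Int) (start_y : Int) (r : Int) : List (Int × Int) :=
  ((PySem.List.pyRange 1 (r + 2) 1).map (fun t => (start_x - r, start_y + t))) ++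
  ((PySem.List.pyRange 1 (2 * r + 2) 1).map (fun t => (start_x - r + t, start_y + r + 1))) ++
  ((PySem.List.pyRange 1 (2 * r + 3) 1).map (fun t => (start_x - r + 2 * r + 1, start_y + r + 1 - t))) ++
  ((PySem.List.pyRange 1 (2 * r + 3) 1).map (fun t => (start_x - r + 2 * r + 1 - t, start_y - r - 1))) ++
  ((PySem.List.pyRange 1 (r + 2) 1).map (fun t => (start_x - r - 1, start_y - r - 1 + t)))

def heliocentric_orbit_alt (start_x : Int) (start_y : Int) (total_rounds : Int) : List (Int × Int) :=
  [(start_x, start_y)] ++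
    (PySem.List.pyRange 0 total_rounds 1).flatMap (pvRoundPoints start_x start_y)

-- ===== PRECONDITION & SPEC =====
def Spec_heliocentric_orbit (start_x : Int) (start_y : Int) (total_rounds : Int) (out : List (Int × Int)) : Prop := out = heliocentric_orbit_alt start_x start_y total_rounds
instance (start_x : Int) (start_y : Int) (total_rounds : Int) (out : List (Int × Int)) : Decidable (Spec_heliocentric_orbit start_x start_y total_rounds out) := by unfold Spec_heliocentric_orbit; infer_instance

-- ===== CLAIM (what is proved, stated in full; the proofs are below) =====
def Claim_equal_heliocentric_orbit : Prop := ∀ (start_x : Int) (start_y : Int) (total_rounds : Int), Dom_heliocentric_orbit start_x start_y total_rounds → Spec_heliocentric_orbit start_x start_y total_rounds (heliocentric_orbit start_x start_y total_rounds)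

-- ===== LEMMAS AND PROOFS =====

-- A's round body (named copy of the lambda in heliocentric_orbit)
def pvARound (st : (Int × Int) × List (Int × Int) × Int) (round : Int) :
    (Int × Int) × List (Int × Int) × Int :=
  let directions : List (Int × Int × Int) :=
    [(0, 1, st.2.2), (1, 0, st.2.2 + round), (0, -1, st.2.2 * 2),
     (-1, 0, st.2.2 * 2), (0, 1, st.2.2)]
  let st2 := directions.foldl
    (fun (s : (Int × Int) × List (Int × Int)) (d : Int × Int × Int) =>
      (PySem.List.pyRange 0 d.2.2 1).foldl
        (fun (s : (Int × Int) × List (Int × Int)) (_ : Int) =>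
          ((s.1.1 + d.1, s.1.2 + d.2.1), s.2 ++ [(s.1.1 + d.1, s.1.2 + d.2.1)]))
        s)
    (st.1, st.2.1)
  (st2.1, st2.2, st.2.2 + 1)

lemma heliocentric_orbit_eq (sx sy n : Int) :
    heliocentric_orbit sx sy n =
      ((PySem.List.pyRange 0 n 1).foldl pvARound ((sx, sy), [(sx, sy)], 1)).2.1 := rfl

-- one of A's unit-step segments, resolved in closed form
lemma segFoldNat (dx dy : Int) (m : Nat) : ∀ (x0 y0 : Int) (p : List (Int × Int)),
    (PySem.List.pyRange 0 (m : Int) 1).foldl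
      (fun (s : (Int × Int) × List (Int × Int)) (_ : Int) =>
        ((s.1.1 + dx, s.1.2 + dy), s.2 ++ [(s.1.1 + dx, s.1.2 + dy)]))
      ((x0, y0), p)
    = ((x0 + (m : Int) * dx, y0 + (m : Int) * dy),
       p ++ (PySem.List.pyRange 1 ((m : Int) + 1) 1).map (fun t => (x0 + t * dx, y0 + t * dy))) := by
  induction m with
  | zero =>
    intro x0 y0 p
    rw [show ((0 : Nat) : Int) = 0 by rfl]
    rw [PySem.List.pyRange_one_eq_nil (le_refl (0:Int)),
        PySem.List.pyRange_one_eq_nil (by omega : (0:Int) + 1 ≤ 1)]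
    simp
  | succ m ih =>
    intro x0 y0 p
    have h1 : ((m + 1 : Nat) : Int) = (m : Int) + 1 := by push_cast; ring
    rw [h1, PySem.List.pyRange_one_succ_right (by positivity : (0:Int) ≤ (m:Int))]
    rw [List.foldl_append, ih]
    simp only [List.foldl_cons, List.foldl_nil]
    rw [PySem.List.pyRange_one_succ_right (by omega : (1:Int) ≤ (m:Int) + 1)]
    simp only [List.map_append, List.map_cons, List.map_nil, List.append_assoc]
    rw [show x0 + (m:Int) * dx + dx = x0 + ((m:Int) + 1) * dx by ring,
        show y0 + (m:Int) * dy + dy = y0 + ((m:Int) + 1) * dy by ring]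

-- segFoldNat with flexible endpoints: k steps of (dx,dy) from (x0,y0)
lemma segFoldI (k k1 dx dy x0 y0 xe ye : Int) (hk : 0 ≤ k) (hk1 : k1 = k + 1)
    (hx : xe = x0 + k * dx) (hy : ye = y0 + k * dy) (p : List (Int × Int))
    (f : Int → Int × Int) (hf : ∀ t, f t = (x0 + t * dx, y0 + t * dy)) :
    (PySem.List.pyRange 0 k 1).foldl
      (fun (s : (Int × Int) × List (Int × Int)) (_ : Int) =>
        ((s.1.1 + dx, s.1.2 + dy), s.2 ++ [(s.1.1 + dx, s.1.2 + dy)]))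
      ((x0, y0), p)
    = ((xe, ye), p ++ (PySem.List.pyRange 1 k1 1).map f) := by
  have hfe : f = (fun t => (x0 + t * dx, y0 + t * dy)) := funext hf
  have hkn : k = ((k.toNat : Nat) : Int) := by omega
  rw [hfe, hx, hy, hk1, hkn, segFoldNat]

-- one round of A, from position (cx, cy) with orbit_radius r + 1
lemma pvRoundEq (r cx cy : Int) (hr : 0 ≤ r) (p : List (Int × Int)) :
    pvARound ((cx, cy), p, r + 1) r =
      ((cx - 1, cy), p ++ pvRoundPoints (cx + r) cy r, r + 2) := by
  simp only [pvARound, pvRoundPoints, List.foldl_cons, List.foldl_nil]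
  rw [segFoldI (r+1) (r+2) 0 1 cx cy cx (cy+r+1) (by omega) (by ring) (by ring) (by ring) p
        (fun t => (cx + r - r, cy + t)) (by intro t; simp only [Prod.mk.injEq]; constructor <;> ring)]
  rw [segFoldI (r+1+r) (2*r+2) 1 0 cx (cy+r+1) (cx+2*r+1) (cy+r+1) (by omega) (by ring)
        (by ring) (by ring) _
        (fun t => (cx + r - r + t, cy + r + 1)) (by intro t; simp only [Prod.mk.injEq]; constructor <;> ring)]
  rw [segFoldI ((r+1)*2) (2*r+3) 0 (-1) (cx+2*r+1) (cy+r+1) (cx+2*r+1) (cy-r-1) (by omega)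
        (by ring) (by ring) (by ring) _
        (fun t => (cx + r - r + 2*r + 1, cy + r + 1 - t)) (by intro t; simp only [Prod.mk.injEq]; constructor <;> ring)]
  rw [segFoldI ((r+1)*2) (2*r+3) (-1) 0 (cx+2*r+1) (cy-r-1) (cx-1) (cy-r-1) (by omega)
        (by ring) (by ring) (by ring) _
        (fun t => (cx + r - r + 2*r + 1 - t, cy - r - 1)) (by intro t; simp only [Prod.mk.injEq]; constructor <;> ring)]
  rw [segFoldI (r+1) (r+2) 0 1 (cx-1) (cy-r-1) (cx-1) cy (by omega) (by ring) (by ring)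
        (by ring) _
        (fun t => (cx + r - r - 1, cy - r - 1 + t)) (by intro t; simp only [Prod.mk.injEq]; constructor <;> ring)]
  simp only [List.append_assoc, Prod.mk.injEq]
  and_intros <;> first | rfl | trivial | ring

-- running A's rounds a, a+1, …, a+n-1 from position (sx - a, sy)
lemma A_run (sx sy : Int) (n : Nat) : ∀ (a : Int), 0 ≤ a → ∀ (p : List (Int × Int)),
    (PySem.List.pyRange a (a + (n : Int)) 1).foldl pvARound ((sx - a, sy), p, a + 1)
      = ((sx - (a + (n : Int)), sy),
         p ++ (PySem.List.pyRange a (a + (n : Int)) 1).flatMap (pvRoundPoints sx sy),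
         a + (n : Int) + 1) := by
  induction n with
  | zero =>
    intro a _ p
    rw [show a + ((0 : Nat) : Int) = a by push_cast; omega]
    rw [PySem.List.pyRange_one_eq_nil (le_refl a)]
    simp
  | succ n ih =>
    intro a ha p
    have hcons : PySem.List.pyRange a (a + ((n + 1 : Nat) : Int)) 1
        = a :: PySem.List.pyRange (a + 1) ((a + 1) + (n : Int)) 1 := by
      rw [show a + ((n + 1 : Nat) : Int) = (a + 1) + (n : Int) by push_cast; omega]
      rw [PySem.List.pyRange_one_cons (by omega)]
    rw [hcons]
    simp only [List.foldl_cons, List.flatMap_cons]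
    rw [pvRoundEq a (sx - a) sy ha p]
    rw [show sx - a + a = sx by ring, show sx - a - 1 = sx - (a + 1) by ring,
        show a + 2 = (a + 1) + 1 by ring]
    rw [ih (a + 1) (by omega) (p ++ pvRoundPoints sx sy a)]
    rw [List.append_assoc]
    rw [show a + ((n + 1 : Nat) : Int) = a + 1 + (n : Int) by push_cast; ring]

-- ===== VERDICT (by name: the statement is the Claim_ definition above) =====
theorem heliocentric_orbit_spec : Claim_equal_heliocentric_orbit := by
  intro sx sy n _
  show heliocentric_orbit sx sy n = heliocentric_orbit_alt sx sy n
  rw [heliocentric_orbit_eq, heliocentric_orbit_alt]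
  by_cases h : n ≤ 0
  · rw [PySem.List.pyRange_one_eq_nil h]
    rfl
  · have h0 : (0 : Int) + ((n.toNat : Nat) : Int) = n := by omega
    have := A_run sx sy n.toNat 0 (le_refl 0) [(sx, sy)]
    rw [h0, show sx - (0:Int) = sx by ring, show (0:Int) + 1 = 1 by ring] at this
    rw [this]
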